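-- pv_equiv track=rewrite | github.com/cmkds/algo | study/7_list_0814/swea.1979/1979.py | acnt
-- ===== SOURCE A (Python) =====
-- def acnt(N, K, lst):
--     ###리턴할 변수 카운트
--     cnt = 0
--     for i in range(N):
--         tmpCnt = 0
--         for j in range(N):
--             #### 1일 때 tmpcnt +1
--             if lst[i][j] == 1:
--                 tmpCnt += 1
--             if lst[i][j]==0:
--                 ## 0이될따 tmpCnt가 K와 같았다면 cnt +1
--                 if tmpCnt == K:
--                     cnt += 1
--                 tmpCnt = 0
--             ###마지막에 도착했을 때 1이면 tmpCnt가 K인지 확인후 cnt +1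
--             if j == N-1 and tmpCnt == K and lst[i][-1] == 1:
--                 cnt +=1
--
--     return cnt
-- ===== SOURCE B (Python) =====
-- def row_runs(w, K):
--     # Count the zero-terminated stretches of w whose number of ones is K,
--     # splitting the row at its first zero recursively; the trailing open
--     # stretch counts only if the row actually ends in a one.
--     if 0 in w:
--         j = w.index(0)
--         head, rest = w[:j], w[j + 1:]
--         return (1 if head.count(1) == K else 0) + row_runs(rest, K)
--     return 1 if w and w[-1] == 1 and w.count(1) == K else 0
--
--
-- def acnt(N, K, lst):
--     if N <= 0:
--         return 0
--     return sum(row_runs(row[:N], K) for row in lst[:N])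
-- ===== Notes on version B (the rewrite author's own statement) =====
-- stated objective: alternative
-- what changed: B replaces A's index loops with running counter and last-column guard by a recursive decomposition: each row window is split at its first zero into stretches, and B sums the stretches whose count of ones equals K (the trailing open stretch only when the row ends in a one).
-- outside the precondition, e.g. on acnt(1, 1, [[1, 0]]): A returns 0, B returns 1
import Mathlib
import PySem

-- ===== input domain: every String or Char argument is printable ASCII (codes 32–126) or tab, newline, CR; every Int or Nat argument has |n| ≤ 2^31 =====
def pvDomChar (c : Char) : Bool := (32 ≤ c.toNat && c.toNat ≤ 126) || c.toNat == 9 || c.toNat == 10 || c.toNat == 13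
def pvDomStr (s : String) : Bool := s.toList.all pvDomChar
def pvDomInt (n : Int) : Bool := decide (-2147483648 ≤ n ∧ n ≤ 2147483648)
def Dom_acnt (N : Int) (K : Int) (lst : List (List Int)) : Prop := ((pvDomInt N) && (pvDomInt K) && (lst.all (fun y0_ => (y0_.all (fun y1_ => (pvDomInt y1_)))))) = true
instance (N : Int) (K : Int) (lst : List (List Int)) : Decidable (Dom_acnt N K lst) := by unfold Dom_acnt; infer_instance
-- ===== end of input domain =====

-- B counts the K-one stretches of each row by recursively splitting the row at its first zero,
-- instead of A's index loops with a running counter and a last-column guard; same cost, plainer shape.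

-- ===== PORT A =====
def acnt (N : Int) (K : Int) (lst : List (List Int)) : Int :=
  (PySem.List.pyRange 0 N 1).foldl (fun cnt i =>
    let row := PySem.List.pyGetD lst i []
    ((PySem.List.pyRange 0 N 1).foldl (fun (p : Int × Int) j =>
        let cnt := p.1
        let tmpCnt := if PySem.List.pyGetD row j 0 = 1 then p.2 + 1 else p.2
        let pr := if PySem.List.pyGetD row j 0 = 0 then
                    (if tmpCnt = K then cnt + 1 else cnt, (0 : Int))
                  else (cnt, tmpCnt)
        let cnt := if j = N - 1 ∧ pr.2 = K ∧ PySem.List.pyGetD row (-1) 0 = 1 then pr.1 + 1 else pr.1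
        (cnt, pr.2)) (cnt, 0)).1) 0

-- ===== PORT B =====
-- helper for rowRuns termination: the part after the first zero is shorter
theorem pv_slice_from_len {w : List Int} {j : Nat}
    (h : PySem.List.index? w 0 = some j) :
    (PySem.List.slice w (some ((j : Int) + 1)) none).length < w.length := by
  obtain ⟨pre, suf, hsplit, hlen, -⟩ := (PySem.List.index?_eq_some_iff w 0 j).mp h
  have hj : j < w.length := by rw [hsplit, ← hlen]; simp
  have : ((j : Int) + 1) = ((j + 1 : Nat) : Int) := by push_cast; ring
  rw [this, PySem.List.slice_from_natCast, List.length_drop]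
  omega

def rowRuns (w : List Int) (K : Int) : Int :=
  match h : PySem.List.index? w 0 with
  | some j =>
      let head := PySem.List.slice w none (some (j : Int))
      let rest := PySem.List.slice w (some ((j : Int) + 1)) none
      (if (PySem.List.count head 1 : Int) = K then 1 else 0) + rowRuns rest K
  | none =>
      if w ≠ [] ∧ PySem.List.pyGetD w (-1) 0 = 1 ∧ (PySem.List.count w 1 : Int) = K then 1 else 0
termination_by w.length
decreasing_by exact pv_slice_from_len h

def acnt_alt (N : Int) (K : Int) (lst : List (List Int)) : Int :=
  if N ≤ 0 then 0
  else ((PySem.List.slice lst none (some N)).map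
          (fun row => rowRuns (PySem.List.slice row none (some N)) K)).sum

-- ===== PRECONDITION & SPEC =====
-- Pre_ admits at least N rows, each of the first N rows of length at least N (else A raises
-- IndexError); a first-N row WIDER than N — outside the N×N task's specification, where A still
-- returns — is admitted only when its true last element and the N-window's last element agree on
-- being 1: there A's trailing-run guard reads row[-1], past the window, and B reads the window,
-- both defensible readings of an unspecified ragged corner.
def Pre_acnt (N : Int) (K : Int) (lst : List (List Int)) : Prop :=
  N ≤ (lst.length : Int) ∧ ∀ row ∈ lst.take N.toNat,
    N ≤ (row.length : Int) ∧
      (PySem.List.pyGetD row (-1) 0 = 1 ↔ PySem.List.pyGetD row (N - 1) 0 = 1)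
instance (N : Int) (K : Int) (lst : List (List Int)) : Decidable (Pre_acnt N K lst) := by
  unfold Pre_acnt; infer_instance

def pvWitness_acnt : Int × Int × List (List Int) := (2, 1, [[1, 0], [1, 1]])

def Spec_acnt (N : Int) (K : Int) (lst : List (List Int)) (out : Int) : Prop := out = acnt_alt N K lst
instance (N : Int) (K : Int) (lst : List (List Int)) (out : Int) : Decidable (Spec_acnt N K lst out) := by unfold Spec_acnt; infer_instance

-- ===== CLAIM (what is proved, stated in full; the proofs are below) =====
def Claim_equal_acnt : Prop := ∀ (N : Int) (K : Int) (lst : List (List Int)), Dom_acnt N K lst → Pre_acnt N K lst → Spec_acnt N K lst (acnt N K lst)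

-- ===== LEMMAS AND PROOFS =====

-- the element-wise step of A's inner loop, with the last-column fixup factored out
def stepS (K : Int) (p : Int × Int) (v : Int) : Int × Int :=
  let t := if v = 1 then p.2 + 1 else p.2
  if v = 0 then (if t = K then p.1 + 1 else p.1, 0) else (p.1, t)

theorem foldl_stepS_no_zero (K : Int) (w : List Int) (h : 0 ∉ w) :
    ∀ c t, w.foldl (stepS K) (c, t) = (c, t + (w.count 1 : Int)) := by
  induction w with
  | nil => intro c t; simp
  | cons v w ih =>
      intro c t
      have hv : v ≠ 0 := by intro hv; exact h (by simp [hv])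
      have hw : 0 ∉ w := fun hm => h (List.mem_cons_of_mem _ hm)
      by_cases h1 : v = 1 <;> simp [stepS, h1, hv, ih hw] <;> push_cast <;> ring

-- the core: A's row fold followed by the last-column fixup equals B's rowRuns
theorem fixup_foldl_eq_rowRuns (K : Int) (w : List Int) : ∀ c : Int,
    (let r := w.foldl (stepS K) (c, 0);
     if r.2 = K ∧ w.getLast? = some 1 then r.1 + 1 else r.1) = c + rowRuns w K := by
  induction hn : w.length using Nat.strong_induction_on generalizing w with
  | _ n ih =>
  intro c
  rw [rowRuns]
  cases hidx : PySem.List.index? w 0 with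
  | none =>
      have h0 : 0 ∉ w := (PySem.List.index?_eq_none_iff w 0).mp hidx
      simp only [foldl_stepS_no_zero K w h0 c 0, zero_add]
      rcases hw : w with _ | ⟨x, xs⟩
      · simp
      · rw [← hw]
        have hne : w ≠ [] := by simp [hw]
        have hlast : PySem.List.pyGetD w (-1) 0 = w.getLast hne :=
          PySem.List.pyGetD_neg_one w 0 hne
        have hl : w.getLast? = some (w.getLast hne) := List.getLast?_eq_some_getLast hne
        rw [PySem.List.count_eq]
        by_cases hk : (w.count 1 : Int) = K <;>
          by_cases h1 : w.getLast hne = 1 <;>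
            simp [hk, hl, h1, hlast, hne]
  | some j =>
      obtain ⟨pre, suf, hsplit, hlen, hnotin⟩ := (PySem.List.index?_eq_some_iff w 0 j).mp hidx
      have hhead : PySem.List.slice w none (some (j : Int)) = pre := by
        rw [PySem.List.slice_to_natCast, hsplit, ← hlen, List.take_left]
      have hrest : PySem.List.slice w (some ((j : Int) + 1)) none = suf := by
        have : ((j : Int) + 1) = ((j + 1 : Nat) : Int) := by push_cast; ring
        rw [this, PySem.List.slice_from_natCast, hsplit]
        have h2 : pre ++ 0 :: suf = (pre ++ [0]) ++ suf := by simp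
        rw [h2, List.drop_left' (by simp [hlen])]
      have hfold : w.foldl (stepS K) (c, 0) =
          suf.foldl (stepS K) ((if (pre.count 1 : Int) = K then c + 1 else c), 0) := by
        rw [hsplit, List.foldl_append, foldl_stepS_no_zero K pre hnotin c 0]
        simp [stepS]
      have hsuflen : suf.length < n := by
        subst hn; rw [hsplit]; simp; omega
      have ihs := ih suf.length hsuflen suf rfl
        ((if (pre.count 1 : Int) = K then c + 1 else c))
      have hlast : w.getLast? = suf.getLast? ∨ suf = [] := by
        rcases hsuf : suf with _ | ⟨y, ys⟩
        · right; rfl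
        · left; rw [hsplit, hsuf]
          rw [List.getLast?_append_of_ne_nil _ (by simp), List.getLast?_cons_cons]
      simp only [hhead, hrest, PySem.List.count_eq, hfold]
      rcases hlast with hl | hl
      · rw [hl] at *
        simp only [ihs]
        by_cases hk : (pre.count 1 : Int) = K <;> simp [hk] <;> ring
      · subst hl
        simp only [List.foldl_nil] at ihs ⊢
        have hwlast : w.getLast? = some 0 := by
          rw [hsplit]; simp
        rw [hwlast]
        rw [rowRuns]
        simp only [PySem.List.index?_eq_idxOf?, List.idxOf?_nil]
        by_cases hk : (pre.count 1 : Int) = K <;> simp [hk] <;> ring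

-- a fold over range(n) indexing xs is a fold over the first n elements of xs
theorem pv_foldl_range_prefix {α β : Type} (f : β → α → β) (xs : List α) (d : α) :
    ∀ (n : Nat), n ≤ xs.length → ∀ (init : β),
    (PySem.List.pyRange 0 (n : Int) 1).foldl
        (fun acc i => f acc (PySem.List.pyGetD xs i d)) init
      = (xs.take n).foldl f init := by
  intro n
  induction n with
  | zero => intro _ init; simp [PySem.List.pyRange_one_eq_nil]
  | succ m ih =>
      intro hm init
      have h1 : ((m + 1 : Nat) : Int) = (m : Int) + 1 := by push_cast; ring
      rw [h1, PySem.List.pyRange_one_succ_right (by positivity), List.foldl_append,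
          ih (by omega)]
      have hm' : m < xs.length := by omega
      have h2 : xs.take (m + 1) = xs.take m ++ [xs[m]] := by
        rw [List.take_succ]; simp [List.getElem?_eq_getElem hm']
      rw [h2, List.foldl_append]
      simp [hm']

-- A's inner loop over the first n entries of a row equals B's rowRuns of the window
theorem pv_rowA (K : Int) (n : Nat) (row : List Int) (hn : n ≤ row.length)
    (hiff : PySem.List.pyGetD row (-1) 0 = 1 ↔ PySem.List.pyGetD row ((n : Int) - 1) 0 = 1)
    (c : Int) :
    ((PySem.List.pyRange 0 (n : Int) 1).foldl (fun (p : Int × Int) j =>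
        let cnt := p.1
        let tmpCnt := if PySem.List.pyGetD row j 0 = 1 then p.2 + 1 else p.2
        let pr := if PySem.List.pyGetD row j 0 = 0 then
                    (if tmpCnt = K then cnt + 1 else cnt, (0 : Int))
                  else (cnt, tmpCnt)
        let cnt := if j = (n : Int) - 1 ∧ pr.2 = K ∧ PySem.List.pyGetD row (-1) 0 = 1 then pr.1 + 1 else pr.1
        (cnt, pr.2)) (c, 0)).1 = c + rowRuns (row.take n) K := by
  have hget : ∀ (j : Int), 0 ≤ j → j < (n : Int) →
      PySem.List.pyGetD row j 0 = PySem.List.pyGetD (row.take n) j 0 := by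
    intro j h0 h1
    rw [PySem.List.pyGetD_eq_getElem row 0 h0 (by omega),
        PySem.List.pyGetD_eq_getElem (row.take n) 0 h0 (by simp; omega)]
    exact (List.getElem_take).symm
  rcases Nat.eq_zero_or_pos n with h0 | hpos
  · subst h0
    rw [rowRuns]
    simp [PySem.List.pyRange_one_eq_nil, PySem.List.index?_eq_idxOf?]
  · have hw : (row.take n).length = n := by simp; omega
    have hne : row.take n ≠ [] := by
      intro h; rw [h] at hw; simp at hw; omega
    -- split off the last index n-1
    have hsplit : PySem.List.pyRange 0 (n : Int) 1
        = PySem.List.pyRange 0 ((n : Int) - 1) 1 ++ [(n : Int) - 1] := by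
      have h := PySem.List.pyRange_one_succ_right (a := 0) (b := (n : Int) - 1) (by omega)
      rw [show ((n : Int) - 1) + 1 = (n : Int) by ring] at h
      exact h
    rw [hsplit, List.foldl_append]
    -- on the prefix the last-column guard is dead: the body is stepS on the window
    have hcongr : (PySem.List.pyRange 0 ((n : Int) - 1) 1).foldl (fun (p : Int × Int) j =>
        let cnt := p.1
        let tmpCnt := if PySem.List.pyGetD row j 0 = 1 then p.2 + 1 else p.2
        let pr := if PySem.List.pyGetD row j 0 = 0 then
                    (if tmpCnt = K then cnt + 1 else cnt, (0 : Int))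
                  else (cnt, tmpCnt)
        let cnt := if j = (n : Int) - 1 ∧ pr.2 = K ∧ PySem.List.pyGetD row (-1) 0 = 1 then pr.1 + 1 else pr.1
        (cnt, pr.2)) ((c : Int), (0 : Int))
        = (PySem.List.pyRange 0 ((n : Int) - 1) 1).foldl
            (fun (p : Int × Int) j => stepS K p (PySem.List.pyGetD (row.take n) j 0)) (c, 0) := by
      apply PySem.List.foldl_congr_mem
      intro p j hj
      have hj' := PySem.List.mem_pyRange_one.mp hj
      have hne' : j ≠ (n : Int) - 1 := by omega
      rw [hget j (by omega) (by omega)]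
      by_cases hv0 : PySem.List.pyGetD (row.take n) j 0 = 0 <;>
        by_cases hv1 : PySem.List.pyGetD (row.take n) j 0 = 1 <;>
          simp [stepS, hv0, hv1, hne']
    rw [hcongr]
    have hcast : ((n : Int) - 1) = ((n - 1 : Nat) : Int) := by omega
    rw [hcast, pv_foldl_range_prefix (stepS K) (row.take n) 0 (n - 1) (by omega)]
    have htake : (row.take n).take (n - 1) = (row.take n).dropLast := by
      rw [List.dropLast_eq_take, hw]
    rw [htake]
    -- the last entry of the window
    have hlastidx : PySem.List.pyGetD row ((n : Int) - 1) 0 = (row.take n).getLast hne := by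
      rw [hget _ (by omega) (by omega),
          PySem.List.pyGetD_eq_getElem (row.take n) 0 (by omega) (by omega),
          List.getLast_eq_getElem]
      congr 1
      omega
    have hguard : (PySem.List.pyGetD row (-1) 0 = 1) = ((row.take n).getLast hne = 1) := by
      rw [← hlastidx]
      exact propext hiff
    have hfoldw : (row.take n).foldl (stepS K) (c, 0)
        = stepS K ((row.take n).dropLast.foldl (stepS K) (c, 0)) ((row.take n).getLast hne) := by
      conv_lhs => rw [← List.dropLast_append_getLast hne]
      rw [List.foldl_append]
      simp
    have hfix := fixup_foldl_eq_rowRuns K (row.take n) c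
    simp only [hfoldw, List.getLast?_eq_some_getLast hne, Option.some_inj] at hfix
    simp only [List.foldl_cons, List.foldl_nil, ← hcast, hguard, hlastidx]
    rw [← hfix]
    by_cases hv0 : (row.take n).getLast hne = 0 <;>
      by_cases hv1 : (row.take n).getLast hne = 1 <;>
        simp [stepS, hv0, hv1]

theorem acnt_spec : Claim_equal_acnt := by
  intro N K lst _hd hpre
  obtain ⟨hlen, hrows⟩ := hpre
  unfold Spec_acnt acnt acnt_alt
  by_cases hN : N ≤ 0
  · rw [PySem.List.pyRange_one_eq_nil hN]
    simp [hN]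
  · push_neg at hN
    rw [if_neg (by omega)]
    obtain ⟨n, rfl⟩ := Int.eq_ofNat_of_zero_le hN.le
    have hn' : n ≤ lst.length := by exact_mod_cast hlen
    have hrows' : ∀ row ∈ lst.take n,
        n ≤ row.length ∧
          (PySem.List.pyGetD row (-1) 0 = 1 ↔ PySem.List.pyGetD row ((n : Int) - 1) 0 = 1) := by
      intro row hr
      have ht : ((n : Int)).toNat = n := by omega
      rw [ht] at hrows
      obtain ⟨h1, h2⟩ := hrows row hr
      exact ⟨by exact_mod_cast h1, h2⟩
    -- outer loop = fold over the first n rows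
    have houter := pv_foldl_range_prefix
      (fun (cnt : Int) (row : List Int) =>
        ((PySem.List.pyRange 0 ((n : Int)) 1).foldl (fun (p : Int × Int) j =>
          let cnt := p.1
          let tmpCnt := if PySem.List.pyGetD row j 0 = 1 then p.2 + 1 else p.2
          let pr := if PySem.List.pyGetD row j 0 = 0 then
                      (if tmpCnt = K then cnt + 1 else cnt, (0 : Int))
                    else (cnt, tmpCnt)
          let cnt := if j = (n : Int) - 1 ∧ pr.2 = K ∧ PySem.List.pyGetD row (-1) 0 = 1 then pr.1 + 1 else pr.1
          (cnt, pr.2)) (cnt, 0)).1)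
      lst [] n hn' 0
    rw [houter]
    -- per row: A's inner loop is rowRuns
    have hbody : (lst.take n).foldl
        (fun (cnt : Int) (row : List Int) =>
          ((PySem.List.pyRange 0 ((n : Int)) 1).foldl (fun (p : Int × Int) j =>
            let cnt := p.1
            let tmpCnt := if PySem.List.pyGetD row j 0 = 1 then p.2 + 1 else p.2
            let pr := if PySem.List.pyGetD row j 0 = 0 then
                        (if tmpCnt = K then cnt + 1 else cnt, (0 : Int))
                      else (cnt, tmpCnt)
            let cnt := if j = (n : Int) - 1 ∧ pr.2 = K ∧ PySem.List.pyGetD row (-1) 0 = 1 then pr.1 + 1 else pr.1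
            (cnt, pr.2)) (cnt, 0)).1) 0
        = (lst.take n).foldl (fun cnt row => cnt + rowRuns (row.take n) K) 0 := by
      apply PySem.List.foldl_congr_mem
      intro cnt row hr
      exact pv_rowA K n row (hrows' row hr).1 (hrows' row hr).2 cnt
    rw [hbody, PySem.List.foldl_add, zero_add]
    simp only [PySem.List.slice_to_natCast]
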